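-- pv_equiv track=rewrite | github.com/seokhohong/missing-word | semantic/makeFeatures.py | getNormalWindows
-- ===== SOURCE A (Python) =====
-- def getNormalWindows(tokens, windowSize, default = ""):
--     windows = []
--     for i in range(len(tokens) - 1):
--         window = []
--         for j in range(-windowSize, windowSize):
--             window.append(getElem(tokens, i + j, default))
--         windows.append(window)
--     return windows
--
-- def getElem(elems, index, default = ""):
--     if index < 0 or index >= len(elems):
--         return default
--     return elems[index]
-- ===== SOURCE B (Python) =====
-- def getNormalWindows(tokens, windowSize, default=""):
--     width = max(2 * windowSize, 0)
--     padded = [default] * windowSize + list(tokens) + [default] * windowSize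
--     return [padded[i:i + width] for i in range(len(tokens) - 1)]
-- ===== Notes on version B (the rewrite author's own statement) =====
-- stated objective: simpler
-- what changed: B builds one padded list up front and emits each window as a single slice, replacing A's nested loop with per-element bounds-checked fetches.
import Mathlib
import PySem

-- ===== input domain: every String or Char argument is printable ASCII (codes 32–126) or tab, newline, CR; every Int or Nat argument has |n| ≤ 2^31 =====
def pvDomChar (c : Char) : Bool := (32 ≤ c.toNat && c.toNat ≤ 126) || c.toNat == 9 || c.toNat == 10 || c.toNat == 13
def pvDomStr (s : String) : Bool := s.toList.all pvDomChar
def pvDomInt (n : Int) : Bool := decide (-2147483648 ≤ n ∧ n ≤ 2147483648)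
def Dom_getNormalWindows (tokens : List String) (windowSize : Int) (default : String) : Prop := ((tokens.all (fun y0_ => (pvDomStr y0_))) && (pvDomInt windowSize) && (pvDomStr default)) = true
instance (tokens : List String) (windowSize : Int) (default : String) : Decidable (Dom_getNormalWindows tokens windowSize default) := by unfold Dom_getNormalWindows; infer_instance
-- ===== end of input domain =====

-- B builds one padded list and takes a slice per window instead of A's nested loop of
-- bounds-checked element fetches; objective: simpler (one pass, no inner loop).

-- ===== PORT A =====
-- helper getElem: bounds-checked fetch with default
def getElemA (elems : List String) (index : Int) (default : String) : String :=
  if index < 0 ∨ index ≥ (elems.length : Int) then default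
  else PySem.List.pyGetD elems index default  -- elems[index]; in range under the guard

def getNormalWindows (tokens : List String) (windowSize : Int) (default : String) : List (List String) :=
  (PySem.List.pyRange 0 ((tokens.length : Int) - 1) 1).foldl
    (fun windows i =>
      windows ++ [ (PySem.List.pyRange (-windowSize) windowSize 1).foldl
        (fun window j => window ++ [getElemA tokens (i + j) default]) [] ]) []

-- ===== PORT B =====
def getNormalWindows_alt (tokens : List String) (windowSize : Int) (default : String) : List (List String) :=
  let width : Int := max (2 * windowSize) 0
  let padded : List String :=
    List.replicate windowSize.toNat default ++ tokens ++ List.replicate windowSize.toNat default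
  (PySem.List.pyRange 0 ((tokens.length : Int) - 1) 1).map
    (fun i => PySem.List.slice padded (some i) (some (i + width)))

-- ===== PRECONDITION & SPEC =====
def Spec_getNormalWindows (tokens : List String) (windowSize : Int) (default : String) (out : List (List String)) : Prop := out = getNormalWindows_alt tokens windowSize default
instance (tokens : List String) (windowSize : Int) (default : String) (out : List (List String)) : Decidable (Spec_getNormalWindows tokens windowSize default out) := by unfold Spec_getNormalWindows; infer_instance

-- ===== CLAIM (what is proved, stated in full; the proofs are below) =====
def Claim_equal_getNormalWindows : Prop := ∀ (tokens : List String) (windowSize : Int) (default : String), Dom_getNormalWindows tokens windowSize default → Spec_getNormalWindows tokens windowSize default (getNormalWindows tokens windowSize default)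

-- ===== LEMMAS AND PROOFS =====

-- the padded list read at nat index m is exactly A's guarded fetch at m - W
theorem padded_getElem (tokens : List String) (W : Nat) (default : String)
    (m : Nat) (hm : m < W + tokens.length + W) :
    (List.replicate W default ++ tokens ++ List.replicate W default)[m]'(by simp; omega)
      = getElemA tokens ((m : Int) - (W : Int)) default := by
  unfold getElemA
  rcases (by omega : m < W ∨ (W ≤ m ∧ m < W + tokens.length) ∨ W + tokens.length ≤ m) with h1 | ⟨h1, h2⟩ | h1
  · rw [List.getElem_append_left (by simp; omega), List.getElem_append_left (by simpa using h1)]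
    rw [if_pos (Or.inl (by omega))]
    simp
  · rw [List.getElem_append_left (by simp; omega), List.getElem_append_right (by simpa using h1)]
    rw [if_neg (by omega)]
    rw [PySem.List.pyGetD_eq_getElem]
    case h1 => omega
    congr 1
    simp
    omega
  · rw [List.getElem_append_right (by simp; omega)]
    rw [if_pos (Or.inr (by omega))]
    simp

-- the inner loop of A equals the slice of the padded list, for each admitted i
theorem inner_eq_slice (tokens : List String) (windowSize : Int) (default : String)
    (i : Int) (hi0 : 0 ≤ i) (hi1 : i < (tokens.length : Int) - 1) :
    (PySem.List.pyRange (-windowSize) windowSize 1).foldl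
        (fun window j => window ++ [getElemA tokens (i + j) default]) []
      = PySem.List.slice
          (List.replicate windowSize.toNat default ++ tokens ++ List.replicate windowSize.toNat default)
          (some i) (some (i + max (2 * windowSize) 0)) := by
  rw [PySem.List.foldl_append_singleton_eq_map]
  rcases (by omega : windowSize ≤ 0 ∨ 0 < windowSize) with hw | hw
  · rw [PySem.List.pyRange_one_eq_nil (by omega)]
    have : max (2 * windowSize) 0 = 0 := by omega
    rw [this, PySem.List.slice_toNat _ hi0 (by omega)]
    simp
  · -- windowSize = W > 0
    obtain ⟨W, hW⟩ : ∃ W : Nat, windowSize = (W : Int) := ⟨windowSize.toNat, by omega⟩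
    obtain ⟨I, hI⟩ : ∃ I : Nat, i = (I : Int) := ⟨i.toNat, by omega⟩
    subst hW hI
    have hmax : max (2 * (W : Int)) 0 = ((2 * W : Nat) : Int) := by push_cast; omega
    rw [hmax, PySem.List.slice_natCast_add]
    have htoNat : ((W : Int)).toNat = W := by omega
    rw [htoNat]
    have hIlen : I + 2 ≤ tokens.length := by omega
    apply List.ext_getElem
    · rw [PySem.List.pyRange_one]
      simp
      omega
    · intro k hk1 hk2
      have hklt : k < 2 * W := by
        simp [PySem.List.length_pyRange_one] at hk1; omega
      have hpadlen : I + k < W + tokens.length + W := by omega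
      simp only [List.nil_append] at hk1 ⊢
      rw [List.getElem_map, PySem.List.getElem_pyRange_one]
      rw [List.getElem_take, List.getElem_drop]
      rw [padded_getElem tokens W default (I + k) hpadlen]
      congr 1
      push_cast
      ring

theorem getNormalWindows_spec : Claim_equal_getNormalWindows := by
  intro tokens windowSize default _
  unfold Spec_getNormalWindows getNormalWindows getNormalWindows_alt
  rw [PySem.List.foldl_append_singleton_eq_map]
  apply List.map_congr_left
  intro i hi
  rw [PySem.List.mem_pyRange_one] at hi
  exact inner_eq_slice tokens windowSize default i hi.1 hi.2
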